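-- pv_equiv track=rewrite | github.com/AaronGWang/BioInformaticsSpecialization | Module 1/1.3/median_string.py | distanceBetweenPatternAndString
-- ===== SOURCE A (Python) =====
-- def computeHammingDistance(p, q):
--   return sum(p != q for p, q in zip(p, q))
--
-- def distanceBetweenPatternAndString(pattern, dna):
--   k = len(pattern)
--
--   distance = 0
--
--   for seq in dna:
--     n = len(seq)
--     hamming_distance = float('inf')
--     for i in range(n - k + 1):
--       new_hamming_distance = computeHammingDistance(pattern, seq[i: i+k])
--       if new_hamming_distance < hamming_distance:
--         hamming_distance =  new_hamming_distance
--     distance += hamming_distance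
--
--   return distance
-- ===== SOURCE B (Python) =====
-- def distanceBetweenPatternAndString(pattern, dna):
--   k = len(pattern)
--   total = 0
--   for seq in dna:
--     counts = [0] * (len(seq) - k + 1)
--     for j, ch in enumerate(pattern):
--       counts = [c + (seq[i + j] != ch) for i, c in enumerate(counts)]
--     total += min(counts)
--   return total
-- ===== Notes on version B (the rewrite author's own statement) =====
-- stated objective: alternative
-- what changed: B replaces A's per-window recomputation of each Hamming distance (min over windows, each summed over the pattern) by a column-wise accumulation: one mismatch-count array over all windows updated once per pattern position, then a single min over the array.
-- outside the precondition, e.g. on distanceBetweenPatternAndString('AA', ['A']): A returns inf, B raises ValueError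
import Mathlib
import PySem

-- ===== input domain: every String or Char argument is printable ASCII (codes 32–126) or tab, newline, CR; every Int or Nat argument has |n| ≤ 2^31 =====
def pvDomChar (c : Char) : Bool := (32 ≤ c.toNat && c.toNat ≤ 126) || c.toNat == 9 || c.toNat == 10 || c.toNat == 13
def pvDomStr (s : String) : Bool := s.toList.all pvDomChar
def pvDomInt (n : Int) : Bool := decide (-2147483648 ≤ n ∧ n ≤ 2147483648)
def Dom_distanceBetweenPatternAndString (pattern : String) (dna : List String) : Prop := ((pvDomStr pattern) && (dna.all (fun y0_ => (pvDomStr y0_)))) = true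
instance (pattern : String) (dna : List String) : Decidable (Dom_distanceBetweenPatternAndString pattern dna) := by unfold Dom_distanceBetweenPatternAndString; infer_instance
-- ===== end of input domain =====

-- B replaces A's per-window recomputation (min over windows of a freshly summed Hamming
-- distance) by a column-wise scheme: one mismatch-count array over all windows, updated once per
-- pattern position, then a single min — an alternative of the same cost.

-- ===== PORT A =====
def computeHammingDistance (p q : String) : Int :=
  ((p.toList.zip q.toList).map (fun pq => if pq.1 ≠ pq.2 then (1 : Int) else 0)).sum

-- Python's float('inf') sentinel is modelled by Option Int (none = inf); under Pre_ the inner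
-- loop always runs, so the final value is 'some _' ('.getD 0' is only reached outside Pre_).
def distanceBetweenPatternAndString (pattern : String) (dna : List String) : Int :=
  let k : Int := PySem.Str.len pattern
  dna.foldl (fun distance seq =>
    let n : Int := PySem.Str.len seq
    let hd : Option Int := (PySem.List.pyRange 0 (n - k + 1) 1).foldl
      (fun hd i =>
        let nh := computeHammingDistance pattern (PySem.Str.slice seq (some i) (some (i + k)))
        match hd with
        | none => some nh
        | some m => if nh < m then some nh else some m) none
    distance + hd.getD 0) 0

-- ===== PORT B =====
-- seq[i + j] is always in range under Pre_, so pyGetD's default is never read there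
-- (Python's min([]) ValueError on a too-short seq is likewise outside Pre_: '.getD 0').
def distanceBetweenPatternAndString_alt (pattern : String) (dna : List String) : Int :=
  let k : Int := PySem.Str.len pattern
  dna.foldl (fun total seq =>
    let counts0 : List Int := List.replicate (PySem.Str.len seq - k + 1).toNat 0
    let counts := (PySem.List.enumerate pattern.toList 0).foldl
      (fun counts jch =>
        (PySem.List.enumerate counts 0).map
          (fun ic => ic.2 + (if PySem.List.pyGetD seq.toList (ic.1 + jch.1) ' ' ≠ jch.2 then (1 : Int) else 0))) counts0
    total + (PySem.List.min? counts (fun x => x)).getD 0) 0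

-- ===== PRECONDITION & SPEC =====
-- Pre_ excludes inputs where some dna string is shorter than the pattern: there A's inner loop
-- never runs and A returns float('inf'), not an int, while B's min([]) raises ValueError.
def Pre_distanceBetweenPatternAndString (pattern : String) (dna : List String) : Prop :=
  ∀ seq ∈ dna, pattern.toList.length ≤ seq.toList.length
instance (pattern : String) (dna : List String) : Decidable (Pre_distanceBetweenPatternAndString pattern dna) := by unfold Pre_distanceBetweenPatternAndString; infer_instance
def pvWitness_distanceBetweenPatternAndString : String × List String := ("AC", ["GGA", "AC"])
def Spec_distanceBetweenPatternAndString (pattern : String) (dna : List String) (out : Int) : Prop := out = distanceBetweenPatternAndString_alt pattern dna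
instance (pattern : String) (dna : List String) (out : Int) : Decidable (Spec_distanceBetweenPatternAndString pattern dna out) := by unfold Spec_distanceBetweenPatternAndString; infer_instance

-- ===== CLAIM (what is proved, stated in full; the proofs are below) =====
def Claim_equal_distanceBetweenPatternAndString : Prop := ∀ (pattern : String) (dna : List String), Dom_distanceBetweenPatternAndString pattern dna → Pre_distanceBetweenPatternAndString pattern dna → Spec_distanceBetweenPatternAndString pattern dna (distanceBetweenPatternAndString pattern dna)

-- ===== LEMMAS AND PROOFS =====

-- Hamming distance of the pattern against the window of s starting at i.
def hamAt (p s : List Char) (i : Nat) : Int :=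
  ((p.zip (s.drop i)).map (fun pq => if pq.1 ≠ pq.2 then (1 : Int) else 0)).sum

theorem zip_take_length {α β : Type} (p : List α) (x : List β) :
    p.zip (x.take p.length) = p.zip x := by
  induction p generalizing x with
  | nil => simp
  | cons a p ih =>
    cases x with
    | nil => simp
    | cons b x => simp [ih]

theorem hamAt_slice (p s : String) (i : Nat) :
    computeHammingDistance p
      (PySem.Str.slice s (some (i : Int)) (some ((i : Int) + (p.toList.length : Int))))
      = hamAt p.toList s.toList i := by
  unfold computeHammingDistance hamAt
  have h0 : (PySem.Str.slice s (some (i : Int)) (some ((i : Int) + (p.toList.length : Int)))).toList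
      = List.take p.toList.length (List.drop i s.toList) := by
    rw [PySem.Str.toList_slice]
    rw [show ((i : Int) + (p.toList.length : Int)) = ((i + p.toList.length : Nat) : Int) by push_cast; ring]
    show PySem.List.slice s.toList (some (i : Int)) (some ((i + p.toList.length : Nat) : Int)) = _
    rw [PySem.List.slice_natCast]
    congr 1
    omega
  rw [h0, zip_take_length]

-- the option-min loop over l computes the running min of g over l
theorem foldl_optmin (l : List Nat) (g : Nat → Int) (a : Int) :
    l.foldl (fun hd i =>
      match hd with
      | none => some (g i)
      | some m => if g i < m then some (g i) else some m) (some a)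
      = some ((l.map g).foldl min a) := by
  induction l generalizing a with
  | nil => rfl
  | cons x t ih =>
    simp only [List.foldl_cons, List.map_cons]
    by_cases h : g x < a
    · rw [if_pos h, ih]
      have : min a (g x) = g x := by omega
      rw [this]
    · rw [if_neg h, ih]
      have : min a (g x) = a := by omega
      rw [this]

theorem enumerate_map_range (m : Nat) (f : Nat → Int) (s : Int) :
    PySem.List.enumerate ((List.range m).map f) s
      = (List.range m).map (fun (i : Nat) => (s + (i : Int), f i)) := by
  apply List.ext_getElem
  · simp [PySem.List.length_enumerate]
  · intro n h1 h2
    rw [PySem.List.getElem_enumerate]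
    simp

-- one column step of B, on counts of the canonical shape
theorem step_map_range (m : Nat) (f : Nat → Int) (S : List Char) (j : Int) (ch : Char) :
    ((PySem.List.enumerate ((List.range m).map f) 0).map
      (fun ic => ic.2 + (if PySem.List.pyGetD S (ic.1 + j) ' ' ≠ ch then (1 : Int) else 0)))
      = (List.range m).map (fun i => f i + (if PySem.List.pyGetD S ((i : Int) + j) ' ' ≠ ch then (1 : Int) else 0)) := by
  rw [enumerate_map_range, List.map_map]
  apply List.map_congr_left
  intro i _
  simp

-- B's fold over the enumerated pattern, on counts of canonical shape
theorem foldl_cols (q : List Char) (s0 : Int) (m : Nat) (f : Nat → Int) (S : List Char) :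
    (PySem.List.enumerate q s0).foldl
      (fun counts jch =>
        (PySem.List.enumerate counts 0).map
          (fun ic => ic.2 + (if PySem.List.pyGetD S (ic.1 + jch.1) ' ' ≠ jch.2 then (1 : Int) else 0)))
      ((List.range m).map f)
      = (List.range m).map (fun i =>
          f i + ((PySem.List.enumerate q s0).map
            (fun jch => if PySem.List.pyGetD S ((i : Int) + jch.1) ' ' ≠ jch.2 then (1 : Int) else 0)).sum) := by
  induction q generalizing s0 f with
  | nil => simp [PySem.List.enumerate_nil]
  | cons ch q ih =>
    rw [PySem.List.enumerate_cons]
    simp only [List.foldl_cons]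
    rw [step_map_range, ih]
    apply List.map_congr_left
    intro i _
    simp [add_assoc]

-- the column sum over the pattern equals the row Hamming distance of the window
theorem colsum_eq_hamAt (p S : List Char) (i j0 : Nat)
    (h : i + j0 + p.length ≤ S.length) :
    ((PySem.List.enumerate p (j0 : Int)).map
      (fun jch => if PySem.List.pyGetD S ((i : Int) + jch.1) ' ' ≠ jch.2 then (1 : Int) else 0)).sum
      = ((p.zip (S.drop (i + j0))).map (fun pq => if pq.1 ≠ pq.2 then (1 : Int) else 0)).sum := by
  induction p generalizing j0 with
  | nil => simp [PySem.List.enumerate_nil]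
  | cons ch p ih =>
    rw [PySem.List.enumerate_cons]
    have hij : i + j0 < S.length := by simp at h; omega
    rw [List.drop_eq_getElem_cons hij]
    simp only [List.zip_cons_cons, List.map_cons, List.sum_cons]
    have h1 : PySem.List.pyGetD S ((i : Int) + (j0 : Int)) ' ' = S[i + j0] := by
      rw [show ((i : Int) + (j0 : Int)) = ((i + j0 : Nat) : Int) by push_cast; ring]
      rw [PySem.List.pyGetD_natCast]
      exact List.getD_eq_getElem S ' ' hij
    have h2 : ((j0 : Int) + 1) = ((j0 + 1 : Nat) : Int) := by push_cast; ring
    rw [h1, h2, ih (j0 + 1) (by simp at h ⊢; omega)]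
    have h3 : i + (j0 + 1) = i + j0 + 1 := by omega
    rw [h3]
    congr 1
    by_cases hA : S[i + j0] = ch
    · simp [hA]
    · simp [hA, Ne.symm hA]

-- per-sequence equality under the length precondition (zeta-expanded bodies of both ports)
theorem perSeq (pattern seq : String) (h : pattern.toList.length ≤ seq.toList.length) :
    ((PySem.List.pyRange 0 (PySem.Str.len seq - PySem.Str.len pattern + 1) 1).foldl
      (fun hd i =>
        match hd with
        | none => some (computeHammingDistance pattern (PySem.Str.slice seq (some i) (some (i + PySem.Str.len pattern))))
        | some m => if computeHammingDistance pattern (PySem.Str.slice seq (some i) (some (i + PySem.Str.len pattern))) < m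
            then some (computeHammingDistance pattern (PySem.Str.slice seq (some i) (some (i + PySem.Str.len pattern))))
            else some m) none).getD 0
    = ((PySem.List.min?
        ((PySem.List.enumerate pattern.toList 0).foldl
          (fun counts jch =>
            (PySem.List.enumerate counts 0).map
              (fun ic => ic.2 + (if PySem.List.pyGetD seq.toList (ic.1 + jch.1) ' ' ≠ jch.2 then (1 : Int) else 0)))
          (List.replicate (PySem.Str.len seq - PySem.Str.len pattern + 1).toNat 0))
        (fun x => x)).getD 0) := by
  have hm : PySem.Str.len seq - PySem.Str.len pattern + 1
      = ((seq.toList.length - pattern.toList.length + 1 : Nat) : Int) := by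
    simp only [PySem.Str.len_eq]; omega
  -- abbreviations
  have hmm : seq.toList.length - pattern.toList.length + 1
      = (seq.toList.length - pattern.toList.length) + 1 := rfl
  -- A side
  rw [hm]
  rw [PySem.List.pyRange_one]
  rw [show (((seq.toList.length - pattern.toList.length + 1 : Nat) : Int) - 0).toNat
      = seq.toList.length - pattern.toList.length + 1 by omega]
  rw [List.foldl_map]
  rw [PySem.List.foldl_congr_mem _ _
      (fun hd (j : Nat) =>
        match hd with
        | none => some (hamAt pattern.toList seq.toList j)
        | some m => if hamAt pattern.toList seq.toList j < m
            then some (hamAt pattern.toList seq.toList j) else some m) none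
      (by
        intro acc j _
        have hs : (0 : Int) + (j : Int) = (j : Int) := by ring
        rw [hs]
        rw [show PySem.Str.len pattern = (pattern.toList.length : Int) from PySem.Str.len_eq pattern]
        rw [hamAt_slice pattern seq j])]
  -- B side: counts have canonical shape
  rw [Int.toNat_natCast]
  rw [show List.replicate (seq.toList.length - pattern.toList.length + 1) (0 : Int)
      = (List.range (seq.toList.length - pattern.toList.length + 1)).map (fun _ => (0 : Int)) by
        simp]
  rw [foldl_cols]
  have hcols :
      (List.range (seq.toList.length - pattern.toList.length + 1)).map (fun (i : Nat) =>
        (fun (_ : Nat) => (0 : Int)) i + ((PySem.List.enumerate pattern.toList 0).map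
          (fun jch => if PySem.List.pyGetD seq.toList ((i : Int) + jch.1) ' ' ≠ jch.2 then (1 : Int) else 0)).sum)
      = (List.range (seq.toList.length - pattern.toList.length + 1)).map
          (fun j => hamAt pattern.toList seq.toList j) := by
    apply List.map_congr_left
    intro i hi
    show (0 : Int) + _ = _
    rw [zero_add]
    unfold hamAt
    have hcs := colsum_eq_hamAt pattern.toList seq.toList i 0
      (by simp only [List.mem_range] at hi; omega)
    rw [Nat.add_zero] at hcs
    rw [Nat.cast_zero] at hcs
    exact hcs
  rw [hcols]
  -- both sides: split off index 0
  rw [List.range_succ_eq_map, List.foldl_cons, List.map_cons]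
  show (List.foldl _ (some (hamAt pattern.toList seq.toList 0)) _).getD 0 = _
  rw [foldl_optmin _ (fun j => hamAt pattern.toList seq.toList j)]
  rw [PySem.List.min?_id_cons]

-- ===== VERDICT (by name: the statement is the Claim_ definition above) =====
theorem distanceBetweenPatternAndString_spec : Claim_equal_distanceBetweenPatternAndString := by
  intro pattern dna _ hpre
  unfold Spec_distanceBetweenPatternAndString
  unfold distanceBetweenPatternAndString distanceBetweenPatternAndString_alt
  apply PySem.List.foldl_congr_mem
  intro acc seq hmem
  have := perSeq pattern seq (hpre seq hmem)
  dsimp only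
  rw [this]
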